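-- pv_equiv track=rewrite | github.com/UncleGedd/datathon_c17 | data_cleaning.py | clean_invalid_leave
-- ===== SOURCE A (Python) =====
-- def get_invalid_leave(pilots):
--     invalid_leave = {}
--     for p in pilots.keys():
--         for l in pilots[p]['Leave']:
--             for day in l:
--                 if day < 0:
--                     invalid_leave[p] = pilots[p]
--     return invalid_leave
--
-- def clean_invalid_leave(pilots):
--     invalid_leave = get_invalid_leave(pilots)
--     for p in invalid_leave:
--         for i, l in enumerate(pilots[p]['Leave']):
--             for j, day in enumerate(l):
--                 if day < 0:
--                     if j == 1:
--                         pilots[p]['Leave'][i][j] = l[j-1]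
--     return pilots
-- ===== SOURCE B (Python) =====
-- def clean_invalid_leave(pilots):
--     # Single pass, no pre-scan: a row is changed by the cleaner exactly when
--     # its day at index 1 is negative, and the fix copies day 0 over day 1.
--     for p in pilots:
--         for l in pilots[p]['Leave']:
--             if len(l) >= 2 and l[1] < 0:
--                 l[1] = l[0]
--     return pilots
-- ===== Notes on version B (the rewrite author's own statement) =====
-- stated objective: simpler
-- what changed: Dropped the get_invalid_leave pre-scan (which reads every day of every pilot to build an 'invalid' dict) and the inner enumerate-over-all-days fixing loop; B makes one pass that inspects only each row's first two days and copies day 0 over a negative day 1, which provably performs exactly A's mutations.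
-- outside the precondition, e.g. on clean_invalid_leave({'a': {'X': [[1]]}}): A raises KeyError, B raises KeyError
import Mathlib
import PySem

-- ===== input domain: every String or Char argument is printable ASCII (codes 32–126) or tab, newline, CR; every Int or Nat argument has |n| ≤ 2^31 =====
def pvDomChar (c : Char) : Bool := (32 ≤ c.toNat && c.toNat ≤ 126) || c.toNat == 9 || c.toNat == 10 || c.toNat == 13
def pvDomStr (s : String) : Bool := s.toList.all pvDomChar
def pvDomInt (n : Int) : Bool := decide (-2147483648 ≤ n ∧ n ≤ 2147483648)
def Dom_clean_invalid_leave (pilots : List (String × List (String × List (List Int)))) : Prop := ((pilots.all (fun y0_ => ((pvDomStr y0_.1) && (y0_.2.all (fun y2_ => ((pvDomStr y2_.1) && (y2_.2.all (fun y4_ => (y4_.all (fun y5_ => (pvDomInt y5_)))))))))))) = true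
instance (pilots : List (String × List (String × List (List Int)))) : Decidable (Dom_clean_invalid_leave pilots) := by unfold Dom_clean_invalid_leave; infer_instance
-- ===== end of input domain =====

-- B drops A's get_invalid_leave pre-scan and fixes each pilot's rows in one shorter pass that reads
-- only each row's first two days (objective: simpler). Both A and B mutate `pilots` in place in
-- Python (the same writes); the equivalence proved here is about the returned value.


-- ===== PORT A =====

-- Python dict lookup on an association list: first match (= dict lookup under Pre_'s unique keys).
def pvLookup {α : Type} (l : List (String × α)) (k : String) : Option α :=
  match l with
  | [] => none
  | (q, a) :: t => if q = k then some a else pvLookup t k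

-- helper get_invalid_leave of A: dict of pilots that have any negative leave day
def get_invalid_leave (pilots : List (String × List (String × List (List Int)))) :
    PySem.Dict String (List (String × List (List Int))) :=
  (pilots.map (fun pk => pk.1)).foldl
    (fun inv p =>
      let pdata := (pvLookup pilots p).getD []          -- pilots[p]
      let leave := (pvLookup pdata "Leave").getD []     -- pilots[p]['Leave']; KeyError (missing key) excluded by Pre_
      leave.foldl
        (fun inv l =>
          l.foldl (fun inv day => if day < 0 then inv.insert p pdata else inv) inv)
        inv)
    PySem.Dict.empty

-- mutate the first binding of key k (Python: in-place update of the dict value; unique keys under Pre_)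
def pvModify {α : Type} (l : List (String × α)) (k : String) (f : α → α) : List (String × α) :=
  match l with
  | [] => []
  | (q, a) :: t => if q = k then (q, f a) :: t else (q, a) :: pvModify t k f

-- the Python assignment pilots[p]['Leave'][i] = r (writing the whole current row object r)
def pvSetRow (pil : List (String × List (String × List (List Int)))) (p : String) (i : Nat)
    (r : List Int) : List (String × List (String × List (List Int))) :=
  pvModify pil p (fun pd => pvModify pd "Leave" (fun lv => lv.set i r))

-- inner loop 'for j, day in enumerate(l)': l is the LIVE row object (aliasing pilots[p]['Leave'][i]),
-- so we carry its current contents in the state; its length never changes, hence the range.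
-- one iteration of 'for j, day in enumerate(l)'
def pvRowStep (p : String) (i : Nat)
    (s : (List (String × List (String × List (List Int)))) × List Int) (j : Nat) :
    (List (String × List (String × List (List Int)))) × List Int :=
  let day := s.2.getD j 0                -- day = current l[j]
  if day < 0 then
    if j = 1 then
      let r := s.2.set j (s.2.getD (j - 1) 0)   -- l[j] = l[j-1]
      (pvSetRow s.1 p i r, r)                    -- the write is visible through pilots
    else s
  else s

def pvRowLoop (pil : List (String × List (String × List (List Int)))) (p : String) (i : Nat)
    (l : List Int) : (List (String × List (String × List (List Int)))) × List Int :=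
  (List.range l.length).foldl (pvRowStep p i) (pil, l)

def clean_invalid_leave (pilots : List (String × List (String × List (List Int)))) :
    List (String × List (String × List (List Int))) :=
  let invalid := get_invalid_leave pilots
  invalid.keys.foldl
    (fun pil p =>
      let pdata := (pvLookup pil p).getD []
      let leave := (pvLookup pdata "Leave").getD []
      (PySem.List.enumerate leave).foldl
        (fun pil il => (pvRowLoop pil p il.1.toNat il.2).1)
        pil)
    pilots

-- ===== PORT B =====

-- 'if len(l) >= 2 and l[1] < 0: l[1] = l[0]'
def pvFixRow (l : List Int) : List Int :=
  match l with
  | a :: b :: t => if b < 0 then a :: a :: t else a :: b :: t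
  | _ => l

def clean_invalid_leave_alt (pilots : List (String × List (String × List (List Int)))) :
    List (String × List (String × List (List Int))) :=
  pilots.map (fun pk => (pk.1, pvModify pk.2 "Leave" (fun lv => lv.map pvFixRow)))

-- ===== PRECONDITION & SPEC =====
-- Pre_ excludes association lists with duplicate keys (a Python dict cannot contain them) and
-- pilots whose record has no 'Leave' binding, on which A (and B) raise KeyError.
def Pre_clean_invalid_leave (pilots : List (String × List (String × List (List Int)))) : Prop :=
  (pilots.map (fun pk => pk.1)).Nodup ∧
  ∀ pk ∈ pilots, (pk.2.map (fun e => e.1)).Nodup ∧ "Leave" ∈ pk.2.map (fun e => e.1)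
instance (pilots : List (String × List (String × List (List Int)))) : Decidable (Pre_clean_invalid_leave pilots) := by unfold Pre_clean_invalid_leave; infer_instance

def pvWitness_clean_invalid_leave : (List (String × List (String × List (List Int)))) :=
  [("a", [("Leave", [[3, -1], [-2], []])]), ("b", [("Leave", [[5, 6]])])]

def Spec_clean_invalid_leave (pilots : List (String × List (String × List (List Int)))) (out : List (String × List (String × List (List Int)))) : Prop := out = clean_invalid_leave_alt pilots
instance (pilots : List (String × List (String × List (List Int)))) (out : List (String × List (String × List (List Int)))) : Decidable (Spec_clean_invalid_leave pilots out) := by unfold Spec_clean_invalid_leave; infer_instance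

-- ===== CLAIM (what is proved, stated in full; the proofs are below) =====
def Claim_equal_clean_invalid_leave : Prop := ∀ (pilots : List (String × List (String × List (List Int)))), Dom_clean_invalid_leave pilots → Pre_clean_invalid_leave pilots → Spec_clean_invalid_leave pilots (clean_invalid_leave pilots)


-- ===== LEMMAS AND PROOFS =====

-- generic facts about pvLookup / pvModify (first-match association-list update)

theorem pvModify_pvModify {α : Type} (l : List (String × α)) (k : String) (f g : α → α) :
    pvModify (pvModify l k f) k g = pvModify l k (fun a => g (f a)) := by
  induction l with
  | nil => rfl
  | cons e t ih =>
    obtain ⟨q, a⟩ := e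
    by_cases h : q = k
    · simp [pvModify, h]
    · simp [pvModify, h, ih]

theorem pvModify_id {α : Type} (l : List (String × α)) (k : String) :
    pvModify l k (fun a => a) = l := by
  induction l with
  | nil => rfl
  | cons e t ih =>
    obtain ⟨q, a⟩ := e
    by_cases h : q = k
    · simp [pvModify, h]
    · simp [pvModify, h, ih]

theorem pvModify_congr {α : Type} {l : List (String × α)} {k : String} {v : α} {f g : α → α}
    (h : pvLookup l k = some v) (hfg : f v = g v) : pvModify l k f = pvModify l k g := by
  induction l with
  | nil => rfl
  | cons e t ih =>
    obtain ⟨q, a⟩ := e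
    by_cases hq : q = k
    · simp [pvLookup, hq] at h
      simp [pvModify, hq, h ▸ hfg]
    · simp [pvLookup, hq] at h
      simp [pvModify, hq, ih h]

theorem pvModify_of_none {α : Type} {l : List (String × α)} {k : String} (f : α → α)
    (h : pvLookup l k = none) : pvModify l k f = l := by
  induction l with
  | nil => rfl
  | cons e t ih =>
    obtain ⟨q, a⟩ := e
    by_cases hq : q = k
    · simp [pvLookup, hq] at h
    · simp [pvLookup, hq] at h
      simp [pvModify, hq, ih h]

theorem pvLookup_of_mem_nodup {α : Type} {l : List (String × α)} {e : String × α}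
    (hnd : (l.map (fun e => e.1)).Nodup) (hm : e ∈ l) : pvLookup l e.1 = some e.2 := by
  induction l with
  | nil => simp at hm
  | cons x t ih =>
    rw [List.map_cons, List.nodup_cons] at hnd
    rcases List.mem_cons.mp hm with hm | hm
    · simp [hm, pvLookup]
    · have hne : x.1 ≠ e.1 := by
        intro hx
        exact hnd.1 (hx ▸ (List.mem_map.mpr ⟨e, hm, rfl⟩))
      have : pvLookup (x :: t) e.1 = pvLookup t e.1 := by
        cases x with
        | mk q a => simp [pvLookup, hne]
      rw [this]
      exact ih hnd.2 hm

theorem pvModify_eq_map {α : Type} {l : List (String × α)} (k : String) (f : α → α)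
    (hnd : (l.map (fun e => e.1)).Nodup) :
    pvModify l k f = l.map (fun e => if e.1 = k then (e.1, f e.2) else e) := by
  induction l with
  | nil => rfl
  | cons x t ih =>
    rw [List.map_cons, List.nodup_cons] at hnd
    obtain ⟨q, a⟩ := x
    by_cases hq : q = k
    · subst hq
      have : ∀ e ∈ t, (if e.1 = q then (e.1, f e.2) else e) = e := by
        intro e he
        have hne : e.1 ≠ q := by
          intro hk
          exact hnd.1 (hk ▸ (List.mem_map.mpr ⟨e, he, rfl⟩))
        simp [hne]
      rw [List.map_cons, List.map_congr_left this, List.map_id']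
      simp [pvModify]
    · simp [pvModify, hq, ih (by exact hnd.2)]

-- the inner row loop of A fixes a row exactly when its second day is negative

def pvNeedsFix (l : List Int) : Bool :=
  match l with
  | _ :: b :: _ => decide (b < 0)
  | _ => false

theorem pvFixRow_of_not {l : List Int} (h : pvNeedsFix l = false) : pvFixRow l = l := by
  match l with
  | [] => rfl
  | [_] => rfl
  | a :: b :: t =>
    simp [pvNeedsFix] at h
    simp [pvFixRow, not_lt.mpr h]

theorem pvFixRow_of_no_neg {l : List Int} (h : ∀ d ∈ l, ¬ d < 0) : pvFixRow l = l := by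
  match l with
  | [] => rfl
  | [_] => rfl
  | a :: b :: t =>
    have hb : ¬ b < 0 := h b (by simp)
    simp [pvFixRow, hb]

theorem foldl_fix {β γ : Type} (step : β → γ → β) (js : List γ) (s : β)
    (h : ∀ s j, j ∈ js → step s j = s) : js.foldl step s = s := by
  induction js generalizing s with
  | nil => rfl
  | cons j t ih =>
    rw [List.foldl_cons, h s j (List.mem_cons_self ..)]
    exact ih s (fun s j hj => h s j (List.mem_cons_of_mem _ hj))

theorem rowStep_ne_one (p : String) (i : Nat)
    (s : (List (String × List (String × List (List Int)))) × List Int) (j : Nat)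
    (hj : j ≠ 1) : pvRowStep p i s j = s := by
  unfold pvRowStep
  rw [if_neg hj]
  simp

theorem rowLoop_fst (pil : List (String × List (String × List (List Int)))) (p : String)
    (i : Nat) (l : List Int) :
    (pvRowLoop pil p i l).1 = if pvNeedsFix l then pvSetRow pil p i (pvFixRow l) else pil := by
  match l with
  | [] => rfl
  | [a] =>
    simp [pvRowLoop, pvNeedsFix, List.range_succ, rowStep_ne_one p i _ 0 (by omega)]
  | a :: b :: t =>
    have hr : List.range (a :: b :: t).length
        = 0 :: 1 :: ((List.range t.length).map Nat.succ).map Nat.succ := by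
      show List.range (t.length + 1 + 1) = _
      rw [List.range_succ_eq_map, List.range_succ_eq_map]
      simp
    unfold pvRowLoop
    rw [hr, List.foldl_cons, List.foldl_cons,
      rowStep_ne_one p i (pil, a :: b :: t) 0 (by omega)]
    have htail : ∀ (s : (List (String × List (String × List (List Int)))) × List Int),
        (((List.range t.length).map Nat.succ).map Nat.succ).foldl (pvRowStep p i) s = s := by
      intro s
      apply foldl_fix
      intro s j hj
      apply rowStep_ne_one
      simp only [List.mem_map] at hj
      obtain ⟨x, ⟨y, _, hy⟩, hx⟩ := hj
      omega
    have h1 : pvRowStep p i (pil, a :: b :: t) 1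
        = if b < 0 then (pvSetRow pil p i (a :: a :: t), a :: a :: t) else (pil, a :: b :: t) := by
      unfold pvRowStep
      simp
    rw [h1]
    by_cases hb : b < 0
    · rw [if_pos hb, htail]
      simp [pvNeedsFix, hb, pvFixRow]
    · rw [if_neg hb, htail]
      simp [pvNeedsFix, hb]

-- a fold of per-row writes at pilot p is one update of p's 'Leave' list

theorem liftSets (ups : List (Int × List Int))
    (pil : List (String × List (String × List (List Int)))) (p : String) :
    ups.foldl (fun pil il => if pvNeedsFix il.2 then pvSetRow pil p il.1.toNat (pvFixRow il.2) else pil) pil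
      = pvModify pil p (fun pd => pvModify pd "Leave"
          (fun cur => ups.foldl (fun cur il => if pvNeedsFix il.2 then cur.set il.1.toNat (pvFixRow il.2) else cur) cur)) := by
  induction ups generalizing pil with
  | nil =>
    simp only [List.foldl_nil]
    have h1 : (fun pd => pvModify pd "Leave" (fun cur => cur))
        = (fun pd : List (String × List (List Int)) => pd) := by
      funext pd
      exact pvModify_id pd "Leave"
    rw [h1, pvModify_id]
  | cons il ups ih =>
    simp only [List.foldl_cons]
    by_cases hc : pvNeedsFix il.2
    · simp only [hc, if_true]
      rw [ih]
      unfold pvSetRow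
      rw [pvModify_pvModify]
      congr 1
      funext pd
      rw [pvModify_pvModify]
    · simp only [hc, Bool.false_eq_true, if_false]
      rw [ih]

theorem set_len {β : Type} (pre : List β) (x : β) (t : List β) (y : β) :
    (pre ++ x :: t).set pre.length y = pre ++ y :: t := by
  induction pre with
  | nil => rfl
  | cons z pre ih => simp [ih]

theorem setfold (lv pre : List (List Int)) :
    (PySem.List.enumerate lv (pre.length : Int)).foldl
      (fun cur il => if pvNeedsFix il.2 then cur.set il.1.toNat (pvFixRow il.2) else cur) (pre ++ lv)
    = pre ++ lv.map pvFixRow := by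
  induction lv generalizing pre with
  | nil => simp
  | cons l t ih =>
    rw [PySem.List.enumerate_cons, List.foldl_cons]
    have hstep : (if pvNeedsFix l then
          (pre ++ l :: t).set ((pre.length : Int)).toNat (pvFixRow l) else pre ++ l :: t)
        = (pre ++ [pvFixRow l]) ++ t := by
      by_cases hc : pvNeedsFix l
      · rw [if_pos hc]
        simp only [Int.toNat_natCast]
        rw [set_len]
        simp
      · rw [if_neg hc, pvFixRow_of_not (by simpa using hc)]
        simp
    simp only [hstep]
    have hlen : (pre.length : Int) + 1 = (((pre ++ [pvFixRow l]).length : Nat) : Int) := by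
      simp
    rw [hlen, ih (pre ++ [pvFixRow l])]
    simp

-- the per-pilot body of A's cleaning loop is one 'Leave'-map update

theorem bodyStep (pil : List (String × List (String × List (List Int)))) (p : String) :
    (PySem.List.enumerate ((pvLookup ((pvLookup pil p).getD []) "Leave").getD [])).foldl
        (fun pil il => (pvRowLoop pil p il.1.toNat il.2).1) pil
    = pvModify pil p (fun pd => pvModify pd "Leave" (fun lv => lv.map pvFixRow)) := by
  have hstep : (fun (pil : List (String × List (String × List (List Int)))) (il : Int × List Int) =>
      (pvRowLoop pil p il.1.toNat il.2).1)
    = (fun pil il => if pvNeedsFix il.2 then pvSetRow pil p il.1.toNat (pvFixRow il.2) else pil) := by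
    funext pil il
    exact rowLoop_fst pil p il.1.toNat il.2
  rw [hstep, liftSets]
  cases hp : pvLookup pil p with
  | none =>
    rw [pvModify_of_none _ hp, pvModify_of_none _ hp]
  | some pd0 =>
    apply pvModify_congr hp
    simp only [Option.getD_some]
    cases hlv : pvLookup pd0 "Leave" with
    | none =>
      rw [pvModify_of_none _ hlv, pvModify_of_none _ hlv]
    | some lv =>
      apply pvModify_congr hlv
      simp only [Option.getD_some]
      have := setfold lv []
      simpa using this

-- characterisation of get_invalid_leave

def pvNegCond (pilots : List (String × List (String × List (List Int)))) (p : String) : Bool :=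
  ((pvLookup ((pvLookup pilots p).getD []) "Leave").getD []).any
    (fun l => l.any (fun d => decide (d < 0)))

def pvStep (pilots : List (String × List (String × List (List Int))))
    (inv : PySem.Dict String (List (String × List (List Int)))) (p : String) :
    PySem.Dict String (List (String × List (List Int))) :=
  if pvNegCond pilots p then inv.insert p ((pvLookup pilots p).getD []) else inv

theorem inner1 {β : Type} (l : List Int) (inv : PySem.Dict String β) (q : String) (v : β) :
    l.foldl (fun inv day => if day < 0 then inv.insert q v else inv) inv
      = if l.any (fun d => decide (d < 0)) then inv.insert q v else inv := by
  induction l generalizing inv with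
  | nil => simp
  | cons d t ih =>
    rw [List.foldl_cons, List.any_cons]
    by_cases hd : d < 0
    · rw [if_pos hd, ih]
      simp only [hd, decide_true, Bool.true_or, if_true]
      by_cases ht : t.any (fun d => decide (d < 0)) <;>
        simp [ht, PySem.Dict.insert_insert_self]
    · rw [if_neg hd, ih]
      simp [hd]

theorem inner2 {β : Type} (lv : List (List Int)) (inv : PySem.Dict String β) (q : String) (v : β) :
    lv.foldl (fun inv l => l.foldl (fun inv day => if day < 0 then inv.insert q v else inv) inv) inv
      = if lv.any (fun l => l.any (fun d => decide (d < 0))) then inv.insert q v else inv := by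
  induction lv generalizing inv with
  | nil => simp
  | cons l t ih =>
    rw [List.foldl_cons, List.any_cons, inner1, ih]
    by_cases hl : l.any (fun d => decide (d < 0))
    · simp only [hl, if_true, Bool.true_or]
      by_cases ht : t.any (fun l => l.any (fun d => decide (d < 0))) <;>
        simp [ht, PySem.Dict.insert_insert_self]
    · simp [hl]

theorem getInv_eq (pilots : List (String × List (String × List (List Int)))) :
    get_invalid_leave pilots = (pilots.map (fun pk => pk.1)).foldl (pvStep pilots) PySem.Dict.empty := by
  unfold get_invalid_leave
  congr 1
  funext inv p
  simp only []
  rw [inner2]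
  rfl

theorem memFold_mono (pilots : List (String × List (String × List (List Int))))
    (ks : List String) (inv : PySem.Dict String (List (String × List (List Int)))) (q : String)
    (h : q ∈ inv.keys) : q ∈ (ks.foldl (pvStep pilots) inv).keys := by
  induction ks generalizing inv with
  | nil => exact h
  | cons k t ih =>
    rw [List.foldl_cons]
    apply ih
    unfold pvStep
    by_cases hc : pvNegCond pilots k
    · rw [if_pos hc]
      exact (PySem.Dict.mem_keys_insert _ _ _ _).mpr (Or.inr h)
    · rw [if_neg hc]; exact h

theorem memFold (pilots : List (String × List (String × List (List Int))))
    (ks : List String) (inv : PySem.Dict String (List (String × List (List Int)))) (q : String)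
    (hq : q ∈ ks) (hneg : pvNegCond pilots q = true) :
    q ∈ (ks.foldl (pvStep pilots) inv).keys := by
  induction ks generalizing inv with
  | nil => simp at hq
  | cons k t ih =>
    rw [List.foldl_cons]
    rcases List.mem_cons.mp hq with hq | hq
    · subst hq
      apply memFold_mono
      unfold pvStep
      rw [if_pos hneg]
      exact (PySem.Dict.mem_keys_insert _ _ _ _).mpr (Or.inl rfl)
    · exact ih _ hq

theorem nodupFold (pilots : List (String × List (String × List (List Int))))
    (ks : List String) (inv : PySem.Dict String (List (String × List (List Int))))
    (h : inv.keys.Nodup) : (ks.foldl (pvStep pilots) inv).keys.Nodup := by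
  induction ks generalizing inv with
  | nil => exact h
  | cons k t ih =>
    rw [List.foldl_cons]
    apply ih
    unfold pvStep
    by_cases hc : pvNegCond pilots k
    · rw [if_pos hc]
      exact PySem.Dict.nodup_keys_insert _ _ _ h
    · rw [if_neg hc]; exact h

-- folding the per-pilot update over a duplicate-free key list is a single map

theorem foldMod (ks : List String) (l : List (String × List (String × List (List Int))))
    (hks : ks.Nodup) (hnd : (l.map (fun e => e.1)).Nodup) :
    ks.foldl (fun acc p => pvModify acc p (fun pd => pvModify pd "Leave" (fun lv => lv.map pvFixRow))) l
      = l.map (fun e => if e.1 ∈ ks then (e.1, pvModify e.2 "Leave" (fun lv => lv.map pvFixRow)) else e) := by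
  induction ks generalizing l with
  | nil => simp
  | cons p t ih =>
    rw [List.nodup_cons] at hks
    rw [List.foldl_cons, pvModify_eq_map p _ hnd]
    have hkeys : ((l.map (fun e => if e.1 = p then (e.1, pvModify e.2 "Leave" (fun lv => lv.map pvFixRow)) else e)).map (fun e => e.1)) = l.map (fun e => e.1) := by
      rw [List.map_map]
      apply List.map_congr_left
      intro e he
      by_cases hp : e.1 = p <;> simp [hp]
    rw [ih _ hks.2 (hkeys ▸ hnd), List.map_map]
    apply List.map_congr_left
    intro e he
    by_cases hp : e.1 = p
    · simp [Function.comp, hp, List.mem_cons, hks.1]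
    · by_cases hpt : e.1 ∈ t <;> simp [Function.comp, hp, hpt]

-- ===== VERDICT (by name: the statement is the Claim_ definition above) =====
theorem clean_invalid_leave_spec : Claim_equal_clean_invalid_leave := by
  intro pilots _ hpre
  obtain ⟨hnd, -⟩ := hpre
  unfold Spec_clean_invalid_leave
  have key : clean_invalid_leave pilots
      = (get_invalid_leave pilots).keys.foldl
          (fun pil p => pvModify pil p (fun pd => pvModify pd "Leave" (fun lv => lv.map pvFixRow)))
          pilots := by
    have h : (fun (pil : List (String × List (String × List (List Int)))) (p : String) =>
        let pdata := (pvLookup pil p).getD []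
        let leave := (pvLookup pdata "Leave").getD []
        (PySem.List.enumerate leave).foldl (fun pil il => (pvRowLoop pil p il.1.toNat il.2).1) pil)
        = (fun pil p => pvModify pil p (fun pd => pvModify pd "Leave" (fun lv => lv.map pvFixRow))) :=
      funext fun pil => funext fun p => bodyStep pil p
    calc clean_invalid_leave pilots
        = (get_invalid_leave pilots).keys.foldl
            (fun pil p =>
              let pdata := (pvLookup pil p).getD []
              let leave := (pvLookup pdata "Leave").getD []
              (PySem.List.enumerate leave).foldl (fun pil il => (pvRowLoop pil p il.1.toNat il.2).1) pil)
            pilots := rfl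
      _ = _ := by rw [h]
  rw [key, getInv_eq]
  have hkn : ((pilots.map (fun pk => pk.1)).foldl (pvStep pilots) PySem.Dict.empty).keys.Nodup :=
    nodupFold pilots _ _ (by simp [PySem.Dict.keys, PySem.Dict.empty])
  rw [foldMod _ _ hkn hnd]
  unfold clean_invalid_leave_alt
  apply List.map_congr_left
  intro e he
  by_cases hm : e.1 ∈ ((pilots.map (fun pk => pk.1)).foldl (pvStep pilots) PySem.Dict.empty).keys
  · simp [hm]
  · rw [if_neg hm]
    have hneg : pvNegCond pilots e.1 = false := by
      by_contra h
      exact hm (memFold pilots _ _ _ (List.mem_map.mpr ⟨e, he, rfl⟩) (by simpa using h))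
    have hlk : pvLookup pilots e.1 = some e.2 := pvLookup_of_mem_nodup hnd he
    unfold pvNegCond at hneg
    rw [hlk] at hneg
    simp only [Option.getD_some] at hneg
    cases hlv : pvLookup e.2 "Leave" with
    | none =>
      rw [pvModify_of_none _ hlv]
    | some lv =>
      rw [hlv] at hneg
      simp only [Option.getD_some] at hneg
      simp only [List.any_eq_false, Bool.not_eq_true, decide_eq_true_eq] at hneg
      have hmap : lv.map pvFixRow = lv := by
        rw [List.map_congr_left (fun l hl => pvFixRow_of_no_neg (hneg l hl)), List.map_id']
      rw [pvModify_congr (g := fun a => a) hlv hmap, pvModify_id]
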